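-- pv_equiv track=rewrite | github.com/Hon139/MuseAid | Composition_App/src/music_app/audio_engine.py | _resolve_sample_pitch
-- ===== SOURCE A (Python) =====
-- FLAT_TO_SHARP_EQUIV = {
--     "CB": "B",
--     "DB": "C#",
--     "EB": "D#",
--     "FB": "E",
--     "GB": "F#",
--     "AB": "G#",
--     "BB": "A#",
--     "E#": "F",
--     "B#": "C",
-- }
--
-- def _resolve_sample_pitch(pitch: str, inst_samples: dict[str, any]) -> str | None:
--     """Resolve requested pitch to an available sample key.
--
--     Supports:
--     - flats/enharmonic spellings -> sharps
--     - octave lift/drop into available sample range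
--     """
--     if pitch in inst_samples:
--         return pitch
--     if len(pitch) < 2 or not pitch[-1].isdigit():
--         return None
--
--     octave = int(pitch[-1])
--     note_name = pitch[:-1].upper()
--     note_name = FLAT_TO_SHARP_EQUIV.get(note_name, note_name)
--
--     candidate = f"{note_name}{octave}"
--     if candidate in inst_samples:
--         return candidate
--
--     # Prefer nearest in-range octave (sample set is typically C4..B5).
--     if octave < 4:
--         candidate = f"{note_name}4"
--         if candidate in inst_samples:
--             return candidate
--     if octave > 5:
--         candidate = f"{note_name}5"
--         if candidate in inst_samples:
--             return candidate
--
--     # Final fallback: try both available octaves.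
--     for octv in (4, 5):
--         candidate = f"{note_name}{octv}"
--         if candidate in inst_samples:
--             return candidate
--
--     return None
-- ===== SOURCE B (Python) =====
-- FLAT_TO_SHARP_EQUIV = {
--     "CB": "B",
--     "DB": "C#",
--     "EB": "D#",
--     "FB": "E",
--     "GB": "F#",
--     "AB": "G#",
--     "BB": "A#",
--     "E#": "F",
--     "B#": "C",
-- }
--
-- def _resolve_sample_pitch(pitch: str, inst_samples: dict[str, any]) -> str | None:
--     """Resolve requested pitch to an available sample key.
--
--     Instead of probing the dict with candidate keys, scan the available keys
--     once, rank each acceptable key by preference, and return the best one.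
--     """
--     if pitch in inst_samples:
--         return pitch
--     if len(pitch) < 2 or not pitch[-1].isdigit():
--         return None
--
--     octave = int(pitch[-1])
--     name = pitch[:-1].upper()
--     name = FLAT_TO_SHARP_EQUIV.get(name, name)
--
--     exact = f"{name}{octave}"
--     # preferred in-range fallback first (5 before 4 when lifting down from above)
--     if octave > 5:
--         near, far = f"{name}5", f"{name}4"
--     else:
--         near, far = f"{name}4", f"{name}5"
--
--     def prio(key):
--         if key == exact:
--             return 0
--         if key == near:
--             return 1
--         if key == far:
--             return 2
--         return None
--
--     best = None
--     for key in inst_samples: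
--         p = prio(key)
--         if p is not None and (best is None or p < best[0]):
--             best = (p, key)
--     return best[1] if best is not None else None
-- ===== Notes on version B (the rewrite author's own statement) =====
-- stated objective: alternative
-- what changed: B inverts the traversal: instead of probing the dict with a fixed sequence of candidate keys (four sequential if-blocks), it makes a single pass over the dict's keys, ranking each key with a priority function (exact octave 0, nearest in-range octave 1, other in-range octave 2) and keeping the minimal-priority key seen.
import Mathlib
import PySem

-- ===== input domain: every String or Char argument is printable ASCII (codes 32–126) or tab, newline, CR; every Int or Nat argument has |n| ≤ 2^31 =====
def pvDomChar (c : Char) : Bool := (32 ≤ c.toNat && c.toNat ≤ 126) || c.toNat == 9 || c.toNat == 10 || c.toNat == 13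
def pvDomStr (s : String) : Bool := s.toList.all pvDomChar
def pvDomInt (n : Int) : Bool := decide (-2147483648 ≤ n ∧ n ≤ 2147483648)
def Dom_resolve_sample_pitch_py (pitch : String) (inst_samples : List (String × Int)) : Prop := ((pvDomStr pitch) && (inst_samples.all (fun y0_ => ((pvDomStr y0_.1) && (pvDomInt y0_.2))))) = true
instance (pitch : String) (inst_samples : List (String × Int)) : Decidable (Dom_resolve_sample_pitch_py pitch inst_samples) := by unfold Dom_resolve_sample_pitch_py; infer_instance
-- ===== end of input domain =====

-- B inverts the traversal: instead of probing the dict with a fixed candidate-key sequence,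
-- it scans the dict's keys once, ranking each by a priority, and keeps the best; objective: alternative.

-- shared module constant: FLAT_TO_SHARP_EQUIV
def pvFlatToSharp : PySem.Dict String String := PySem.Dict.ofList
  [("CB","B"),("DB","C#"),("EB","D#"),("FB","E"),("GB","F#"),("AB","G#"),("BB","A#"),("E#","F"),("B#","C")]

-- 'k in d' for the dict parameter (key membership)
def pvHasKey (inst_samples : List (String × Int)) (k : String) : Bool :=
  inst_samples.any (fun p => p.1 == k)

-- ===== PORT A =====
def resolve_sample_pitch_py (pitch : String) (inst_samples : List (String × Int)) : Option String :=
  if pvHasKey inst_samples pitch then some pitch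
  else if PySem.Str.len pitch < 2 then none
  else match PySem.Str.pyGet? pitch (-1) with
  | none => none  -- unreachable: len pitch ≥ 2
  | some last =>
    if !(PySem.Chars.isdigit last) then none
    else
      let octave : Int := (PySem.Int.ofStr? (String.ofList [last])).getD 0  -- int(pitch[-1]); guard: isdigit holds
      let note_name0 := PySem.Str.upper (PySem.Str.slice pitch none (some (-1)))
      let note_name := PySem.Dict.getD pvFlatToSharp note_name0 note_name0
      let candidate := note_name ++ PySem.Int.toStr octave
      if pvHasKey inst_samples candidate then some candidate
      else
        -- if octave < 4 / if octave > 5 blocks, then the for-loop over (4, 5) unrolled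
        if octave < 4 && pvHasKey inst_samples (note_name ++ PySem.Int.toStr 4) then
          some (note_name ++ PySem.Int.toStr 4)
        else if octave > 5 && pvHasKey inst_samples (note_name ++ PySem.Int.toStr 5) then
          some (note_name ++ PySem.Int.toStr 5)
        else if pvHasKey inst_samples (note_name ++ PySem.Int.toStr 4) then
          some (note_name ++ PySem.Int.toStr 4)
        else if pvHasKey inst_samples (note_name ++ PySem.Int.toStr 5) then
          some (note_name ++ PySem.Int.toStr 5)
        else none

-- ===== PORT B =====
-- prio(key): rank an available key against the requested note (0 exact, 1 near, 2 far)
def pvPrio (exact near far k : String) : Option Int :=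
  if k == exact then some 0 else if k == near then some 1 else if k == far then some 2 else none

-- the single pass 'for key in inst_samples: … keep minimal-priority key'
def pvScan (exact near far : String) : List (String × Int) → Option (Int × String) → Option (Int × String)
  | [], best => best
  | (k, _) :: rest, best =>
    match pvPrio exact near far k with
    | none => pvScan exact near far rest best
    | some p =>
      match best with
      | none => pvScan exact near far rest (some (p, k))
      | some (bp, bk) =>
        if p < bp then pvScan exact near far rest (some (p, k))
        else pvScan exact near far rest (some (bp, bk))

def resolve_sample_pitch_py_alt (pitch : String) (inst_samples : List (String × Int)) : Option String :=
  if pvHasKey inst_samples pitch then some pitch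
  else if PySem.Str.len pitch < 2 then none
  else match PySem.Str.pyGet? pitch (-1) with
  | none => none  -- unreachable: len pitch ≥ 2
  | some last =>
    if !(PySem.Chars.isdigit last) then none
    else
      let octave : Int := (PySem.Int.ofStr? (String.ofList [last])).getD 0
      let name0 := PySem.Str.upper (PySem.Str.slice pitch none (some (-1)))
      let name := PySem.Dict.getD pvFlatToSharp name0 name0
      let exact := name ++ PySem.Int.toStr octave
      let nearfar := if octave > 5 then (name ++ "5", name ++ "4") else (name ++ "4", name ++ "5")
      match pvScan exact nearfar.1 nearfar.2 inst_samples none with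
      | some (_, k) => some k
      | none => none

-- ===== PRECONDITION & SPEC =====
def Spec_resolve_sample_pitch_py (pitch : String) (inst_samples : List (String × Int)) (out : Option String) : Prop := out = resolve_sample_pitch_py_alt pitch inst_samples
instance (pitch : String) (inst_samples : List (String × Int)) (out : Option String) : Decidable (Spec_resolve_sample_pitch_py pitch inst_samples out) := by unfold Spec_resolve_sample_pitch_py; infer_instance

-- ===== CLAIM (what is proved, stated in full; the proofs are below) =====
def Claim_equal_resolve_sample_pitch_py : Prop := ∀ (pitch : String) (inst_samples : List (String × Int)), Dom_resolve_sample_pitch_py pitch inst_samples → Spec_resolve_sample_pitch_py pitch inst_samples (resolve_sample_pitch_py pitch inst_samples)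

-- ===== LEMMAS AND PROOFS =====

-- leftmost-minimum merge of two scan states
def pvMerge (a b : Option (Int × String)) : Option (Int × String) :=
  match a, b with
  | none, b => b
  | some a, none => some a
  | some (ap, ak), some (bp, bk) => if bp < ap then some (bp, bk) else some (ap, ak)

-- the first present candidate in priority order
def pvBest3 (exact near far : String) (l : List (String × Int)) : Option (Int × String) :=
  if pvHasKey l exact then some (0, exact)
  else if pvHasKey l near then some (1, near)
  else if pvHasKey l far then some (2, far)
  else none

theorem pvMerge_assoc (a b c : Option (Int × String)) :
    pvMerge (pvMerge a b) c = pvMerge a (pvMerge b c) := by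
  rcases a with _ | ⟨ap, ak⟩
  · rfl
  rcases b with _ | ⟨bp, bk⟩
  · cases c <;> rfl
  rcases c with _ | ⟨cp, ck⟩
  · simp only [pvMerge]; split_ifs <;> rfl
  by_cases h1 : bp < ap <;> by_cases h2 : cp < bp <;> by_cases h3 : cp < ap <;>
    simp [pvMerge, h1, h2, h3] <;> exfalso <;> omega

theorem pvBest3_cons (exact near far k : String) (v : Int) (rest : List (String × Int)) :
    pvBest3 exact near far ((k, v) :: rest)
      = pvMerge (match pvPrio exact near far k with
                  | some p => some (p, k)
                  | none => none) (pvBest3 exact near far rest) := by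
  have hck : ∀ key : String, pvHasKey ((k, v) :: rest) key = ((k == key) || pvHasKey rest key) := by
    intro key; simp [pvHasKey]
  by_cases he : k = exact
  · subst he
    simp only [pvPrio, pvBest3, hck, beq_self_eq_true, Bool.true_or, if_pos]
    rcases h1 : pvHasKey rest k with _ | _ <;> rcases h2 : pvHasKey rest near with _ | _ <;>
      rcases h3 : pvHasKey rest far with _ | _ <;> simp [pvBest3, pvMerge, h1, h2, h3]
  · by_cases hn : k = near
    · subst hn
      simp only [pvPrio, pvBest3, hck, beq_self_eq_true, beq_iff_eq, he, if_pos, Bool.true_or]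
      rcases h1 : pvHasKey rest exact with _ | _ <;> rcases h2 : pvHasKey rest k with _ | _ <;>
        rcases h3 : pvHasKey rest far with _ | _ <;>
        simp [pvBest3, pvMerge, h1, h2, h3, hck, he]
    · by_cases hf : k = far
      · subst hf
        simp only [pvPrio, beq_iff_eq, he, hn, beq_self_eq_true, if_pos]
        rcases h1 : pvHasKey rest exact with _ | _ <;> rcases h2 : pvHasKey rest near with _ | _ <;>
          rcases h3 : pvHasKey rest k with _ | _ <;>
          simp [pvBest3, pvMerge, h1, h2, h3, hck, he, hn]
      · simp [pvPrio, pvBest3, pvMerge, hck, he, hn, hf]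

theorem pvScan_eq_best3 (exact near far : String) (l : List (String × Int))
    (acc : Option (Int × String)) :
    pvScan exact near far l acc = pvMerge acc (pvBest3 exact near far l) := by
  induction l generalizing acc with
  | nil => simp [pvScan, pvBest3, pvHasKey, pvMerge]; cases acc <;> simp [pvMerge]
  | cons kv rest ih =>
    obtain ⟨k, v⟩ := kv
    rw [pvBest3_cons]
    rcases hp : pvPrio exact near far k with _ | p
    · simp only [pvScan, hp, ih, pvMerge]
    · have step : pvScan exact near far ((k, v) :: rest) acc
          = pvScan exact near far rest (pvMerge acc (some (p, k))) := by
        rcases acc with _ | ⟨bp, bk⟩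
        · simp [pvScan, hp, pvMerge]
        · simp only [pvScan, hp, pvMerge]
          split_ifs <;> rfl
      rw [step, ih, pvMerge_assoc]

-- A's candidate-probing tail equals B's scan for the same exact/near/far keys
theorem tails_eq (name : String) (inst : List (String × Int)) (octave : Int) :
    (if pvHasKey inst (name ++ PySem.Int.toStr octave) then
        some (name ++ PySem.Int.toStr octave)
      else
        if octave < 4 && pvHasKey inst (name ++ PySem.Int.toStr 4) then
          some (name ++ PySem.Int.toStr 4)
        else if octave > 5 && pvHasKey inst (name ++ PySem.Int.toStr 5) then
          some (name ++ PySem.Int.toStr 5)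
        else if pvHasKey inst (name ++ PySem.Int.toStr 4) then
          some (name ++ PySem.Int.toStr 4)
        else if pvHasKey inst (name ++ PySem.Int.toStr 5) then
          some (name ++ PySem.Int.toStr 5)
        else none)
    = (match pvScan (name ++ PySem.Int.toStr octave)
          (if octave > 5 then (name ++ "5", name ++ "4") else (name ++ "4", name ++ "5")).1
          (if octave > 5 then (name ++ "5", name ++ "4") else (name ++ "4", name ++ "5")).2
          inst none with
        | some (_, k) => some k
        | none => none) := by
  have e4 : PySem.Int.toStr 4 = "4" := by decide
  have e5 : PySem.Int.toStr 5 = "5" := by decide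
  rw [pvScan_eq_best3]
  by_cases h5 : octave > 5
  · have h4 : ¬ octave < 4 := by omega
    simp only [if_pos h5, e4, e5]
    by_cases ke : pvHasKey inst (name ++ PySem.Int.toStr octave) <;>
      by_cases k4 : pvHasKey inst (name ++ "4") <;>
      by_cases k5 : pvHasKey inst (name ++ "5") <;>
      simp [pvBest3, pvMerge, ke, k4, k5, h4, h5]
  · simp only [if_neg h5, e4, e5]
    by_cases ke : pvHasKey inst (name ++ PySem.Int.toStr octave) <;>
      by_cases k4 : pvHasKey inst (name ++ "4") <;>
      by_cases k5 : pvHasKey inst (name ++ "5") <;>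
      by_cases h4 : octave < 4 <;>
      simp [pvBest3, pvMerge, ke, k4, k5, h4, h5]

-- ===== VERDICT (by name: the statement is the Claim_ definition above) =====
theorem resolve_sample_pitch_py_spec : Claim_equal_resolve_sample_pitch_py := by
  intro pitch inst_samples _
  unfold Spec_resolve_sample_pitch_py resolve_sample_pitch_py resolve_sample_pitch_py_alt
  simp only [tails_eq]
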